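-- pv_equiv track=rewrite | github.com/pyne/pyne | pyne/partisn.py | format_repeated_vector
-- ===== SOURCE A (Python) =====
-- def format_repeated_vector(vector):
--     """Creates string out of a vector with the PARTISN format for repeated
--     numbers.
--
--     Parameters:
--     -----------
--     vector: list
--         Desired list to be formatted
--
--     Returns:
--     --------
--     string: string
--         Formatted string representation of the vector
--
--     Example:
--         vector = [1, 2, 0, 0, 0, 7, 8, 3, 3]
--         string = "1 2 3R 0 7 8 2R 3"
--     """
--
--     # put vector into a list of lists formatted as
--     # [[number , R], [number, R], ...]
--     # where 'R' is the number of times that 'number' is repeated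
--     tot = 0
--     repeats = []
--     for i, val in enumerate(vector):
--         if tot == 0:
--             repeats.append([val, 1])
--             tot += 1
--         else:
--             if val == repeats[tot - 1][0]:
--                 repeats[tot - 1][1] += 1
--             else:
--                 repeats.append([val, 1])
--                 tot += 1
--
--     # make into a string of characters
--     string = ""
--     n = 0
--     for pair in repeats:
--         if pair[1] == 1:
--             string += "{} ".format(pair[0])
--             n = +1
--         else:
--             string += "{0}R {1} ".format(pair[1], pair[0])
--             n += 2
--
--     return string
-- ===== SOURCE B (Python) =====
-- def format_repeated_vector(vector):
--     parts = []
--     i = 0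
--     n = len(vector)
--     while i < n:
--         j = i
--         while j < n and vector[j] == vector[i]:
--             j += 1
--         count = j - i
--         if count == 1:
--             parts.append("{} ".format(vector[i]))
--         else:
--             parts.append("{}R {} ".format(count, vector[i]))
--         i = j
--     return "".join(parts)
-- ===== Notes on version B (the rewrite author's own statement) =====
-- stated objective: simpler
-- what changed: Replaces A's two passes (building a [value,count] pair list with a tot counter plus a separate formatting pass with string +=) by a single two-pointer scan that emits each run's token directly and joins them at the end.
import Mathlib
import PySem

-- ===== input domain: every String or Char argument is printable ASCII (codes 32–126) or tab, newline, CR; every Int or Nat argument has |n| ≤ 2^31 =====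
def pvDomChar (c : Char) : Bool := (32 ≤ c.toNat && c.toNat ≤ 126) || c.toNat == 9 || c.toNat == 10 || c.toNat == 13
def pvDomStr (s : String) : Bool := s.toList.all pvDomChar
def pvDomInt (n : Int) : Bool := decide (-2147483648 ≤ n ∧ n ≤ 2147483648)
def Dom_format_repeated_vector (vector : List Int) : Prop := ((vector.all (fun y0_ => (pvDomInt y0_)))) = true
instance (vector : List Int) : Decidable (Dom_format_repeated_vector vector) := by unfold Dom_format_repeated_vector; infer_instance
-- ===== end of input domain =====

-- B replaces A's two passes (pair-list accumulator with a tot counter, then a formatting pass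
-- with string +=) by a single two-pointer run scan that emits each run's token directly (simpler).

-- ===== PORT A =====
-- one loop iteration of A's first pass; state is (tot, repeats)
def pvStepA (st : Int × List (Int × Int)) (val : Int) : Int × List (Int × Int) :=
  let tot := st.1
  let repeats := st.2
  if tot == 0 then
    (tot + 1, repeats ++ [(val, 1)])
  else
    match PySem.List.pyGet? repeats (tot - 1) with
    | some p =>
        if val == p.1 then
          -- repeats[tot - 1][1] += 1
          (tot, repeats.modify (tot - 1).toNat (fun q => (q.1, q.2 + 1)))
        else
          (tot + 1, repeats ++ [(val, 1)])
    | none => (tot, repeats)  -- unreachable: tot = len(repeats) throughout, so the index is in range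

-- one iteration of A's second pass; state is (string, n)
def pvFmtStepA (st : String × Int) (pair : Int × Int) : String × Int :=
  if pair.2 == 1 then
    (st.1 ++ PySem.Int.toStr pair.1 ++ " ", 1)          -- n = +1
  else
    (st.1 ++ PySem.Int.toStr pair.2 ++ "R " ++ PySem.Int.toStr pair.1 ++ " ", st.2 + 2)

def format_repeated_vector (vector : List Int) : String :=
  let repeats := (vector.foldl pvStepA (0, [])).2
  (repeats.foldl pvFmtStepA ("", 0)).1

-- ===== PORT B =====
-- inner while of Source B: length of the run of v at the front, and the rest of the list
def pvRunSplit (v : Int) : List Int → Nat × List Int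
  | [] => (0, [])
  | x :: xs =>
      if x == v then
        let r := pvRunSplit v xs
        (r.1 + 1, r.2)
      else (0, x :: xs)

theorem pvRunSplit_length_le (v : Int) (xs : List Int) : (pvRunSplit v xs).2.length ≤ xs.length := by
  induction xs with
  | nil => simp [pvRunSplit]
  | cons x xs ih =>
      simp only [pvRunSplit]
      split
      · exact Nat.le_succ_of_le ih
      · simp

-- outer while of Source B: one token per run
def pvTokensB : List Int → List String
  | [] => []
  | x :: xs =>
      let r := pvRunSplit x xs
      let count : Int := (r.1 : Int) + 1
      (if count == 1 then PySem.Int.toStr x ++ " "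
       else PySem.Int.toStr count ++ "R " ++ PySem.Int.toStr x ++ " ") :: pvTokensB r.2
  termination_by l => l.length
  decreasing_by
    exact Nat.lt_succ_of_le (pvRunSplit_length_le x xs)

-- "".join(parts): joining on the empty separator is concatenation (exact)
def format_repeated_vector_alt (vector : List Int) : String :=
  (pvTokensB vector).foldl (· ++ ·) ""

-- ===== PRECONDITION & SPEC =====
def Spec_format_repeated_vector (vector : List Int) (out : String) : Prop := out = format_repeated_vector_alt vector
instance (vector : List Int) (out : String) : Decidable (Spec_format_repeated_vector vector out) := by unfold Spec_format_repeated_vector; infer_instance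

-- ===== CLAIM (what is proved, stated in full; the proofs are below) =====
def Claim_equal_format_repeated_vector : Prop := ∀ (vector : List Int), Dom_format_repeated_vector vector → Spec_format_repeated_vector vector (format_repeated_vector vector)

-- ===== LEMMAS AND PROOFS =====

-- the token a (value, count) pair is rendered to
def pvTok (a c : Int) : String :=
  if c == 1 then PySem.Int.toStr a ++ " "
  else PySem.Int.toStr c ++ "R " ++ PySem.Int.toStr a ++ " "

-- concatenation of a list of strings
def pvCat : List String → String
  | [] => ""
  | t :: ts => t ++ pvCat ts

-- run-length encoding continuing an open run of value a seen c times
def pvRleFrom (a c : Int) : List Int → List (Int × Int)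
  | [] => [(a, c)]
  | x :: xs => if x == a then pvRleFrom a (c + 1) xs else (a, c) :: pvRleFrom x 1 xs

theorem pvFoldl_append_eq_cat (l : List String) (s : String) :
    l.foldl (· ++ ·) s = s ++ pvCat l := by
  induction l generalizing s with
  | nil => simp [pvCat]
  | cons t ts ih => simp [pvCat, ih, String.append_assoc]

theorem pvFmtA_eq_cat (rs : List (Int × Int)) (s : String) (n : Int) :
    (rs.foldl pvFmtStepA (s, n)).1 = s ++ pvCat (rs.map (fun p => pvTok p.1 p.2)) := by
  induction rs generalizing s n with
  | nil => simp [pvCat]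
  | cons p ps ih =>
      simp only [List.foldl_cons, List.map_cons, pvCat]
      by_cases h : p.2 = 1
      · have h' : (p.2 == 1) = true := by simpa using h
        rw [show pvFmtStepA (s, n) p = (s ++ PySem.Int.toStr p.1 ++ " ", 1) from by
          simp [pvFmtStepA, h']]
        rw [ih]
        simp [pvTok, h', String.append_assoc]
      · have h' : (p.2 == 1) = false := by simpa using h
        rw [show pvFmtStepA (s, n) p =
            (s ++ PySem.Int.toStr p.2 ++ "R " ++ PySem.Int.toStr p.1 ++ " ", n + 2) from by
          simp [pvFmtStepA, h']]
        rw [ih]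
        simp [pvTok, h', String.append_assoc]

theorem pvModify_concat {α : Type} (rs : List α) (p : α) (f : α → α) :
    (rs ++ [p]).modify rs.length f = rs ++ [f p] := by
  induction rs with
  | nil => simp [List.modify]
  | cons x xs ih => simpa [List.modify] using ih

theorem pvFoldA_spec (xs : List Int) (rs : List (Int × Int)) (a c : Int) :
    xs.foldl pvStepA (((rs.length : Int) + 1), rs ++ [(a, c)]) =
      (((rs.length : Int) + ((pvRleFrom a c xs).length : Int)), rs ++ pvRleFrom a c xs) := by
  induction xs generalizing rs a c with
  | nil => simp [pvRleFrom]
  | cons x xs ih =>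
      have htot : (((rs.length : Int) + 1) == 0) = false := by
        simp; omega
      have hget : PySem.List.pyGet? (rs ++ [(a, c)]) ((rs.length : Int) + 1 - 1) = some (a, c) := by
        have : ((rs.length : Int) + 1 - 1) = ((rs.length : Nat) : Int) := by omega
        rw [this, PySem.List.pyGet?_natCast]
        simp
      simp only [List.foldl_cons, pvStepA, htot, Bool.false_eq_true, if_false, hget]
      by_cases hx : x = a
      · have hx' : (x == a) = true := by simpa using hx
        have hmod : (rs ++ [(a, c)]).modify ((rs.length : Int) + 1 - 1).toNat
            (fun q => (q.1, q.2 + 1)) = rs ++ [(a, c + 1)] := by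
          have : ((rs.length : Int) + 1 - 1).toNat = rs.length := by omega
          rw [this, pvModify_concat]
        simp only [hx', if_true, hmod]
        rw [ih rs a (c + 1)]
        simp only [pvRleFrom, hx', if_true]
      · have hx' : (x == a) = false := by simpa using hx
        have hlen : (rs.length : Int) + 1 + 1 = (((rs ++ [(a, c)]).length : Int) + 1) := by
          simp
        simp only [hx', Bool.false_eq_true, if_false, hlen]
        rw [ih (rs ++ [(a, c)]) x 1]
        simp only [pvRleFrom, hx', Bool.false_eq_true, if_false]
        refine Prod.ext ?_ ?_
        · simp only [List.length_append, List.length_cons, List.length_nil]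
          push_cast
          ring
        · simp

theorem pvBridge (xs : List Int) (a c : Int) :
    pvCat ((pvRleFrom a c xs).map (fun p => pvTok p.1 p.2)) =
      pvTok a (c + ((pvRunSplit a xs).1 : Int)) ++ pvCat (pvTokensB (pvRunSplit a xs).2) := by
  induction xs generalizing a c with
  | nil => simp [pvRleFrom, pvRunSplit, pvCat, pvTokensB]
  | cons x xs ih =>
      by_cases hx : x = a
      · have hx' : (x == a) = true := by simpa using hx
        simp only [pvRleFrom, hx', if_true, pvRunSplit]
        rw [ih a (c + 1)]
        congr 2
        push_cast
        ring
      · have hx' : (x == a) = false := by simpa using hx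
        simp only [pvRleFrom, hx', Bool.false_eq_true, if_false, List.map_cons, pvCat,
          pvRunSplit]
        rw [ih x 1]
        simp only [pvTokensB, pvCat, pvTok]
        have h1 : ((1 : Int) + ((pvRunSplit x xs).1 : Int)) = (((pvRunSplit x xs).1 : Int) + 1) := by ring
        rw [h1]
        simp [String.append_assoc]

-- ===== VERDICT (by name: the statement is the Claim_ definition above) =====
theorem format_repeated_vector_spec : Claim_equal_format_repeated_vector := by
  intro vector _
  show format_repeated_vector vector = format_repeated_vector_alt vector
  cases vector with
  | nil => simp [format_repeated_vector, format_repeated_vector_alt, pvTokensB]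
  | cons x xs =>
      unfold format_repeated_vector format_repeated_vector_alt
      have hfirst : pvStepA (0, []) x = (((([] : List (Int × Int)).length : Int) + 1), ([] : List (Int × Int)) ++ [(x, 1)]) := by
        simp [pvStepA]
      rw [List.foldl_cons, hfirst, pvFoldA_spec xs [] x 1]
      simp only [List.nil_append]
      rw [pvFmtA_eq_cat, pvFoldl_append_eq_cat]
      simp only [String.empty_append]
      rw [pvBridge xs x 1]
      simp only [pvTokensB, pvCat]
      congr 2
      ring
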